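-- pv_equiv track=rewrite | github.com/pypi-data/pypi-mirror-217 | packages/isotools/isotools-0.3.4-py3-none-any.whl/isotools/gene.py | find_runlength
-- ===== SOURCE A (Python) =====
-- def find_runlength(align, max_mm):
--     '''Find the runlength, e.g. the number of True in the list before the max_mm+1 False occur.
--     '''
--     score = [0]*(max_mm+1)
--     mm = 0
--     for a in align:
--         if not a:
--             mm += 1
--             if mm > max_mm:
--                 return score
--             score[mm] = score[mm-1]
--         else:
--             score[mm] += 1
--     for i in range(mm+1, max_mm+1):
--         score[i] = score[i-1]
--     return score
-- ===== SOURCE B (Python) =====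
-- def find_runlength(align, max_mm):
--     '''Find the runlength, e.g. the number of True in the list before the max_mm+1 False occur.
--     '''
--     false_pos = [i for i, a in enumerate(align) if not a]
--     total_trues = len(align) - len(false_pos)
--     return [false_pos[k] - k if k < len(false_pos) else total_trues
--             for k in range(max_mm + 1)]
-- ===== Notes on version B (the rewrite author's own statement) =====
-- stated objective: alternative
-- what changed: Replaces A's stateful score-array loop with early return and fill-up pass by one pass collecting False indices plus a closed-form per-slot formula (trues before the (k+1)-th False = false_pos[k]-k).
import Mathlib
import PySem

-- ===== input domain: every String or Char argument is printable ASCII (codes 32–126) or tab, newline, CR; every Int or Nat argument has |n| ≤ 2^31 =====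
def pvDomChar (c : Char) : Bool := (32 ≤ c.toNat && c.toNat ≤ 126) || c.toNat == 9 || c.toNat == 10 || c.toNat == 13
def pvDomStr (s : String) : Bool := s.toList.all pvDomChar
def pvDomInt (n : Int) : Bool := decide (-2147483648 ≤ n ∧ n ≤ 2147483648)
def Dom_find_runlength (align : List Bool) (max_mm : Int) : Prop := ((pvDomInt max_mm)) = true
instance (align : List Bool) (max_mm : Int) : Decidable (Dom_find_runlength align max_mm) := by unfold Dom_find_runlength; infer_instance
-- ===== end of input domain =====

-- B replaces A's stateful score-array loop (with early return and fill-up pass) by one pass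
-- collecting the indices of the False entries plus a closed-form per-slot formula; alternative
-- decomposition, same cost.


-- ===== PORT A =====
-- the for-loop over align with state (score, mm); returning `score` early at mm > max_mm and,
-- at the end of the list, running A's second fill loop `for i in range(mm+1, max_mm+1)`
def find_runlength_go (max_mm : Int) : List Bool → List Int → Int → List Int
  | [], score, mm =>
      (PySem.List.pyRange (mm + 1) (max_mm + 1) 1).foldl
        (fun s i => PySem.List.pySetD s i (PySem.List.pyGetD s (i - 1) 0)) score
  | a :: rest, score, mm =>
      if a = false then
        if mm + 1 > max_mm then score
        else
          find_runlength_go max_mm rest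
            (PySem.List.pySetD score (mm + 1) (PySem.List.pyGetD score (mm + 1 - 1) 0)) (mm + 1)
      else
        find_runlength_go max_mm rest
          (PySem.List.pySetD score mm (PySem.List.pyGetD score mm 0 + 1)) mm

def find_runlength (align : List Bool) (max_mm : Int) : List Int :=
  find_runlength_go max_mm align (List.replicate (max_mm + 1).toNat 0) 0

-- ===== PORT B =====
def find_runlength_alt (align : List Bool) (max_mm : Int) : List Int :=
  let false_pos : List Int :=
    (PySem.List.enumerate align).filterMap (fun p => if p.2 = false then some p.1 else none)
  let total_trues : Int := (align.length : Int) - false_pos.length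
  (PySem.List.pyRange 0 (max_mm + 1) 1).map (fun k =>
    if k < (false_pos.length : Int) then PySem.List.pyGetD false_pos k 0 - k else total_trues)

-- ===== PRECONDITION & SPEC =====
-- Pre_ excludes exactly the inputs where A raises IndexError: max_mm < 0 (so score is empty)
-- with the list starting with True (`score[0] += 1` on the empty score).
def Pre_find_runlength (align : List Bool) (max_mm : Int) : Prop :=
  0 ≤ max_mm ∨ align.head? ≠ some true
instance (align : List Bool) (max_mm : Int) : Decidable (Pre_find_runlength align max_mm) := by
  unfold Pre_find_runlength; infer_instance

def pvWitness_find_runlength : List Bool × Int := ([true, false, true], 1)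

def Spec_find_runlength (align : List Bool) (max_mm : Int) (out : List Int) : Prop :=
  out = find_runlength_alt align max_mm
instance (align : List Bool) (max_mm : Int) (out : List Int) : Decidable (Spec_find_runlength align max_mm out) := by
  unfold Spec_find_runlength; infer_instance

-- ===== CLAIM (what is proved, stated in full; the proofs are below) =====
def Claim_equal_find_runlength : Prop := ∀ (align : List Bool) (max_mm : Int), Dom_find_runlength align max_mm → Pre_find_runlength align max_mm → Spec_find_runlength align max_mm (find_runlength align max_mm)


-- ===== LEMMAS AND PROOFS =====

-- trueRun align j = number of Trues in align before its (j+1)-th False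
-- (total Trues if align has at most j Falses)
def trueRun : List Bool → Nat → Int
  | [], _ => 0
  | (true :: rest), j => 1 + trueRun rest j
  | (false :: _), 0 => 0
  | (false :: rest), j + 1 => trueRun rest j

def fpOf (align : List Bool) (s : Int) : List Int :=
  (PySem.List.enumerate align s).filterMap (fun p => if p.2 = false then some p.1 else none)

theorem fpOf_cons_true (rest : List Bool) (s : Int) :
    fpOf (true :: rest) s = fpOf rest (s + 1) := by
  simp [fpOf, PySem.List.enumerate_cons]

theorem fpOf_cons_false (rest : List Bool) (s : Int) :
    fpOf (false :: rest) s = s :: fpOf rest (s + 1) := by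
  simp [fpOf, PySem.List.enumerate_cons]

theorem alt_formula (align : List Bool) : ∀ (s : Int) (k : Nat),
    (if (k : Int) < ((fpOf align s).length : Int) then (fpOf align s).getD k 0 - s - k
     else (align.length : Int) - (fpOf align s).length) = trueRun align k := by
  induction align with
  | nil => intro s k; simp [trueRun, fpOf, PySem.List.enumerate_nil]
  | cons a rest ih =>
    intro s k
    cases a with
    | true =>
      have h := ih (s + 1) k
      rw [fpOf_cons_true]
      simp only [trueRun, List.length_cons]
      split at h <;> split <;> push_cast at * <;> omega
    | false =>
      rw [fpOf_cons_false]
      simp only [List.length_cons]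
      cases k with
      | zero => simp [trueRun]
      | succ j =>
        have h := ih (s + 1) j
        simp only [trueRun, List.getD_cons_succ]
        rcases lt_or_ge (j : Int) ((fpOf rest (s + 1)).length : Int) with hc | hc
        · rw [if_pos hc] at h
          rw [if_pos (by push_cast; omega)]
          push_cast; omega
        · rw [if_neg (by omega)] at h
          rw [if_neg (by push_cast; omega)]
          push_cast; omega

theorem fill_loop (max_mm : Int) : ∀ (n : Nat) (s : List Int) (i : Int), 0 < i →
    (max_mm + 1 - i).toNat = n → s.length = (max_mm + 1).toNat →
    (PySem.List.pyRange i (max_mm + 1) 1).foldl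
        (fun t j => PySem.List.pySetD t j (PySem.List.pyGetD t (j - 1) 0)) s
      = (List.range (max_mm + 1).toNat).map (fun (k : Nat) =>
          if (k : Int) < i then s.getD k 0 else s.getD (i - 1).toNat 0) := by
  intro n
  induction n with
  | zero =>
    intro s i hi hn hlen
    rw [PySem.List.pyRange_one_eq_nil (by omega), List.foldl_nil]
    apply List.ext_getElem (by simp [hlen])
    intro k hk1 hk2
    simp only [List.getElem_map, List.getElem_range]
    rw [if_pos (by rw [hlen] at hk1; omega),
      List.getElem_eq_getD 0]
  | succ m ih =>
    intro s i hi hn hlen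
    rw [PySem.List.pyRange_one_cons (by omega), List.foldl_cons]
    have hset : PySem.List.pySetD s i (PySem.List.pyGetD s (i - 1) 0)
        = s.set i.toNat (s.getD (i - 1).toNat 0) := by
      have hir : i - 1 < (s.length : Int) := by omega
      rw [PySem.List.pySetD_of_nonneg s _ (by omega),
        PySem.List.pyGetD_eq_getElem s 0 (by omega) hir, List.getElem_eq_getD 0]
    rw [hset, ih _ (i + 1) (by omega) (by omega) (by simp [hlen])]
    apply List.map_congr_left
    intro k hk
    simp only [List.mem_range] at hk
    have hilen : i.toNat < s.length := by omega
    by_cases h1 : (k : Int) < i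
    · rw [if_pos (by omega), if_pos h1]
      simp only [List.getD_eq_getElem?_getD]
      rw [List.getElem?_set_ne (by omega)]
    · have hii : (i + 1 - 1).toNat = i.toNat := by omega
      by_cases h2 : (k : Int) < i + 1
      · have hki : k = i.toNat := by omega
        rw [if_pos h2, if_neg h1, hki, List.getD_eq_getElem?_getD,
          List.getElem?_set_self hilen, Option.getD_some]
      · rw [if_neg h2, if_neg h1, hii, List.getD_eq_getElem?_getD,
          List.getElem?_set_self hilen, Option.getD_some]

theorem go_eq (max_mm : Int) (hM : 0 ≤ max_mm) : ∀ (align : List Bool) (s : List Int) (mm : Int),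
    0 ≤ mm → mm ≤ max_mm → s.length = (max_mm + 1).toNat →
    find_runlength_go max_mm align s mm
      = (List.range (max_mm + 1).toNat).map (fun (k : Nat) =>
          if (k : Int) < mm then s.getD k 0
          else s.getD mm.toNat 0 + trueRun align (k - mm.toNat)) := by
  intro align
  induction align with
  | nil =>
    intro s mm h0 h1 hlen
    show (PySem.List.pyRange (mm + 1) (max_mm + 1) 1).foldl _ s = _
    rw [fill_loop max_mm (max_mm + 1 - (mm + 1)).toNat s (mm + 1) (by omega) rfl hlen]
    apply List.map_congr_left
    intro k hk
    simp only [List.mem_range] at hk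
    have hmm : (mm + 1 - 1).toNat = mm.toNat := by omega
    have htr : trueRun [] (k - mm.toNat) = 0 := by cases k - mm.toNat <;> rfl
    by_cases h1' : (k : Int) < mm
    · rw [if_pos (by omega), if_pos h1']
    · rw [if_neg h1', htr, add_zero]
      by_cases heq : (k : Int) < mm + 1
      · rw [if_pos heq]
        congr 1
        omega
      · rw [if_neg heq, hmm]
  | cons a rest ih =>
    intro s mm h0 h1 hlen
    have hmlen : mm.toNat < s.length := by omega
    cases a with
    | true =>
      show find_runlength_go max_mm rest
          (PySem.List.pySetD s mm (PySem.List.pyGetD s mm 0 + 1)) mm = _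
      have hset : PySem.List.pySetD s mm (PySem.List.pyGetD s mm 0 + 1)
          = s.set mm.toNat (s.getD mm.toNat 0 + 1) := by
        rw [PySem.List.pySetD_of_nonneg s _ h0,
          PySem.List.pyGetD_eq_getElem s 0 h0 (by omega), List.getElem_eq_getD 0]
      rw [hset, ih _ mm h0 h1 (by simp [hlen])]
      apply List.map_congr_left
      intro k hk
      simp only [List.mem_range] at hk
      by_cases h1' : (k : Int) < mm
      · rw [if_pos h1', if_pos h1']
        simp only [List.getD_eq_getElem?_getD]
        rw [List.getElem?_set_ne (by omega)]
      · rw [if_neg h1', if_neg h1', List.getD_eq_getElem?_getD,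
          List.getElem?_set_self hmlen, Option.getD_some, trueRun]
        rw [List.getD_eq_getElem?_getD]
        ring
    | false =>
      show (if mm + 1 > max_mm then s else _) = _
      by_cases hgt : mm + 1 > max_mm
      · rw [if_pos hgt]
        have hme : mm = max_mm := by omega
        apply List.ext_getElem (by simp [hlen])
        intro k hk1 hk2
        simp only [List.getElem_map, List.getElem_range]
        by_cases h1' : (k : Int) < mm
        · rw [if_pos h1', List.getElem_eq_getD 0]
        · have hke : k = mm.toNat := by rw [hlen] at hk1; omega
          subst hke
          rw [if_neg h1', Nat.sub_self]
          show s[mm.toNat] = s.getD mm.toNat 0 + trueRun (false :: rest) 0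
          rw [trueRun, List.getElem_eq_getD 0]
          ring
      · rw [if_neg hgt]
        have hset : PySem.List.pySetD s (mm + 1) (PySem.List.pyGetD s (mm + 1 - 1) 0)
            = s.set (mm + 1).toNat (s.getD mm.toNat 0) := by
          have : mm + 1 - 1 = mm := by ring
          rw [this, PySem.List.pySetD_of_nonneg s _ (by omega),
            PySem.List.pyGetD_eq_getElem s 0 h0 (by omega), List.getElem_eq_getD 0]
        have hm1len : (mm + 1).toNat < s.length := by omega
        rw [hset, ih _ (mm + 1) (by omega) (by omega) (by simp [hlen])]
        apply List.map_congr_left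
        intro k hk
        simp only [List.mem_range] at hk
        by_cases h1' : (k : Int) < mm
        · rw [if_pos (by omega), if_pos h1']
          simp only [List.getD_eq_getElem?_getD]
          rw [List.getElem?_set_ne (by omega)]
        · rw [if_neg h1']
          have hsetget : (s.set (mm + 1).toNat (s.getD mm.toNat 0)).getD (mm + 1).toNat 0
              = s.getD mm.toNat 0 := by
            rw [List.getD_eq_getElem?_getD, List.getElem?_set_self hm1len, Option.getD_some]
          by_cases h2 : (k : Int) < mm + 1
          · have hke : k = mm.toNat := by omega
            rw [if_pos h2, hke, List.getD_eq_getElem?_getD,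
              List.getElem?_set_ne (by omega), Nat.sub_self]
            show s[mm.toNat]?.getD 0 = s.getD mm.toNat 0 + trueRun (false :: rest) 0
            rw [trueRun, ← List.getD_eq_getElem?_getD]
            ring
          · rw [if_neg h2, hsetget]
            have hk1 : k - mm.toNat = (k - (mm + 1).toNat) + 1 := by omega
            rw [hk1]
            show s.getD mm.toNat 0 + trueRun (false :: rest) (k - (mm+1).toNat + 1)
              = s.getD mm.toNat 0 + trueRun rest (k - (mm+1).toNat)
            rw [trueRun]

-- ===== VERDICT (by name: the statement is the Claim_ definition above) =====
theorem find_runlength_spec : Claim_equal_find_runlength := by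
  intro align max_mm _ hPre
  unfold Spec_find_runlength find_runlength find_runlength_alt
  by_cases hM : 0 ≤ max_mm
  · rw [go_eq max_mm hM align _ 0 le_rfl hM (by simp)]
    simp only [PySem.List.pyRange_one]
    rw [List.map_map]
    simp only [Int.sub_zero]
    apply List.map_congr_left
    intro k hk
    simp only [Function.comp_apply, Int.toNat_zero, Nat.sub_zero]
    rw [if_neg (by omega)]
    have hrep : ∀ j : Nat, (List.replicate (max_mm + 1).toNat (0 : Int)).getD j 0 = 0 := by
      intro j
      rw [List.getD_eq_getElem?_getD]
      cases h : (List.replicate (max_mm + 1).toNat (0 : Int))[j]? with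
      | none => rfl
      | some v => simp [List.getElem?_replicate] at h; simp [h.2]
    rw [hrep, zero_add]
    have h := alt_formula align 0 k
    rw [← h]
    unfold fpOf
    simp
  · -- max_mm < 0: both sides are []
    have h1 : (max_mm + 1).toNat = 0 := by omega
    rw [PySem.List.pyRange_one_eq_nil (by omega), List.map_nil, h1, List.replicate_zero]
    cases align with
    | nil =>
      show (PySem.List.pyRange (0 + 1) (max_mm + 1) 1).foldl _ [] = []
      rw [PySem.List.pyRange_one_eq_nil (by omega), List.foldl_nil]
    | cons a rest =>
      cases a with
      | true => exact absurd rfl (hPre.resolve_left hM)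
      | false =>
        show (if (0 : Int) + 1 > max_mm then [] else _) = ([] : List Int)
        rw [if_pos (by omega)]
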